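-- pv_equiv track=rewrite | github.com/tommygorham/fin-scrape | scripts/scraper.py | count_insider_transactions_from_json
-- ===== SOURCE A (Python) =====
-- from collections import defaultdict
--
-- def count_insider_transactions_from_json(data):
--     """Count insider transactions from JSON data."""
--     counts = defaultdict(lambda: [0, 0])
--
--     for item in data:
--         ticker = item.get('issuerTradingSymbol')
--         if not ticker or ticker == '-':
--             continue
--
--         transaction_code = item.get('transactionCode', '').lower()
--         if transaction_code == 'sale':
--             counts[ticker][0] += 1
--         else:
--             counts[ticker][1] += 1
--
--     return {k: tuple(v) for k, v in counts.items()}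
-- ===== SOURCE B (Python) =====
-- from collections import Counter
--
-- def count_insider_transactions_from_json(data):
--     """Count insider transactions from JSON data."""
--     pairs = []
--     for item in data:
--         ticker = item.get('issuerTradingSymbol')
--         if not ticker or ticker == '-':
--             continue
--         pairs.append((ticker, item.get('transactionCode', '').lower()))
--     sales = Counter(t for t, c in pairs if c == 'sale')
--     others = Counter(t for t, c in pairs if c != 'sale')
--     return {t: (sales.get(t, 0), others.get(t, 0))
--             for t in dict.fromkeys(t for t, _ in pairs)}
-- ===== Notes on version B (the rewrite author's own statement) =====
-- stated objective: idiomatic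
-- what changed: Replaces the single branching defaultdict loop by a filter pass collecting valid (ticker, code) pairs, two Counters (sale vs non-sale) built separately, and a final join over the first-occurrence key order.
import Mathlib
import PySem

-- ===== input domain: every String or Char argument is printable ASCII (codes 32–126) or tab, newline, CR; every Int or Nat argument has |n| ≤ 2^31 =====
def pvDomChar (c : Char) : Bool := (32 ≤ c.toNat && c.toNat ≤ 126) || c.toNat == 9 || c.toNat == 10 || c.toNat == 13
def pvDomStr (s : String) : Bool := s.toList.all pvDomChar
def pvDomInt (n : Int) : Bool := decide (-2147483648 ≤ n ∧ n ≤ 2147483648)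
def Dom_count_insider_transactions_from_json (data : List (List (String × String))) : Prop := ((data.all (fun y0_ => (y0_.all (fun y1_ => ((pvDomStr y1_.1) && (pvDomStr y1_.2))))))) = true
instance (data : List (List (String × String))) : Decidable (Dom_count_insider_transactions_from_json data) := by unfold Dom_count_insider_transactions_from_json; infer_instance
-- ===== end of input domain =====

-- B replaces A's single branching defaultdict loop by a filter pass plus two Counters
-- joined over the first-occurrence key order (objective: more idiomatic; not faster).

-- ===== PORT A =====
-- one loop step of A: skip missing/falsy/'-' tickers, bump slot 0 on 'sale' else slot 1
def cijStepA (d : PySem.Dict String (Int × Int)) (item : List (String × String)) :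
    PySem.Dict String (Int × Int) :=
  match item.lookup "issuerTradingSymbol" with
  | none => d
  | some ticker =>
    if ticker = "" ∨ ticker = "-" then d
    else
      let code := PySem.Str.lower ((item.lookup "transactionCode").getD "")
      if code = "sale" then d.modify ticker (0, 0) (fun v => (v.1 + 1, v.2))
      else d.modify ticker (0, 0) (fun v => (v.1, v.2 + 1))

def count_insider_transactions_from_json (data : List (List (String × String))) :
    List (String × Int × Int) :=
  let counts := data.foldl cijStepA PySem.Dict.empty
  counts.items.map (fun p => (p.1, p.2.1, p.2.2))

-- ===== PORT B =====
-- Source B's first loop: collect the valid (ticker, lowered code) pairs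
def cijPairStep (acc : List (String × String)) (item : List (String × String)) :
    List (String × String) :=
  match item.lookup "issuerTradingSymbol" with
  | none => acc
  | some ticker =>
    if ticker = "" ∨ ticker = "-" then acc
    else acc ++ [(ticker, PySem.Str.lower ((item.lookup "transactionCode").getD ""))]

def count_insider_transactions_from_json_alt (data : List (List (String × String))) :
    List (String × Int × Int) :=
  let pairs := data.foldl cijPairStep []
  let sales := PySem.Dict.counter ((pairs.filter (fun p => p.2 == "sale")).map (·.1))
  let others := PySem.Dict.counter ((pairs.filter (fun p => !(p.2 == "sale"))).map (·.1))
  (PySem.List.dedup (pairs.map (·.1))).map (fun t => (t, sales.getD t 0, others.getD t 0))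

-- ===== PRECONDITION & SPEC =====
def Spec_count_insider_transactions_from_json (data : List (List (String × String))) (out : List (String × Int × Int)) : Prop := out = count_insider_transactions_from_json_alt data
instance (data : List (List (String × String))) (out : List (String × Int × Int)) : Decidable (Spec_count_insider_transactions_from_json data out) := by unfold Spec_count_insider_transactions_from_json; infer_instance

-- ===== CLAIM (what is proved, stated in full; the proofs are below) =====
def Claim_equal_count_insider_transactions_from_json : Prop := ∀ (data : List (List (String × String))), Dom_count_insider_transactions_from_json data → Spec_count_insider_transactions_from_json data (count_insider_transactions_from_json data)

-- ===== LEMMAS AND PROOFS =====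

-- proof-side view of one valid item as an optional pair
def cijPair? (item : List (String × String)) : Option (String × String) :=
  match item.lookup "issuerTradingSymbol" with
  | none => none
  | some ticker =>
    if ticker = "" ∨ ticker = "-" then none
    else some (ticker, PySem.Str.lower ((item.lookup "transactionCode").getD ""))

-- pair-level step corresponding to one accepted item of A
def cijPStep (d : PySem.Dict String (Int × Int)) (p : String × String) :
    PySem.Dict String (Int × Int) :=
  d.modify p.1 (0, 0) (fun v => if p.2 = "sale" then (v.1 + 1, v.2) else (v.1, v.2 + 1))

theorem cijStepA_eq (d : PySem.Dict String (Int × Int)) (item : List (String × String)) :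
    cijStepA d item = match cijPair? item with
      | none => d
      | some p => cijPStep d p := by
  unfold cijStepA cijPair? cijPStep
  cases item.lookup "issuerTradingSymbol" with
  | none => rfl
  | some t =>
    by_cases h : t = "" ∨ t = "-" <;> simp [h]
    by_cases hc : PySem.Str.lower ((item.lookup "transactionCode").getD "") = "sale" <;>
      simp [hc]

theorem cijPairStep_eq (acc : List (String × String)) (item : List (String × String)) :
    cijPairStep acc item = acc ++ (cijPair? item).toList := by
  unfold cijPairStep cijPair?
  cases item.lookup "issuerTradingSymbol" with
  | none => simp
  | some t => by_cases h : t = "" ∨ t = "-" <;> simp [h]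

theorem pairs_foldl_eq (data : List (List (String × String)))
    (acc : List (String × String)) :
    data.foldl cijPairStep acc = acc ++ data.flatMap (fun item => (cijPair? item).toList) := by
  induction data generalizing acc with
  | nil => simp
  | cons item rest ih => simp [List.foldl_cons, cijPairStep_eq, ih, List.flatMap_cons]

theorem foldA_eq_foldP (data : List (List (String × String)))
    (d : PySem.Dict String (Int × Int)) :
    data.foldl cijStepA d =
      (data.flatMap (fun item => (cijPair? item).toList)).foldl cijPStep d := by
  induction data generalizing d with
  | nil => rfl
  | cons item rest ih =>
    simp only [List.foldl_cons, List.flatMap_cons, List.foldl_append, cijStepA_eq]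
    cases cijPair? item <;> simp [ih]

theorem getD_foldl_pstep (pairs : List (String × String))
    (d : PySem.Dict String (Int × Int)) (t : String) :
    (pairs.foldl cijPStep d).getD t (0, 0) =
      ((d.getD t (0, 0)).1 + ((pairs.filter (fun p => p.2 == "sale")).map (·.1)).count t,
       (d.getD t (0, 0)).2 + ((pairs.filter (fun p => !(p.2 == "sale"))).map (·.1)).count t) := by
  induction pairs generalizing d with
  | nil => simp
  | cons p rest ih =>
    simp only [List.foldl_cons, ih]
    rw [cijPStep, PySem.Dict.getD_modify]
    by_cases hs : p.2 = "sale" <;> by_cases ht : t = p.1 <;>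
      simp [hs, ht, List.count_cons, Prod.ext_iff] <;>
      first | ring | exact fun h => ht h.symm

theorem keys_foldl_pstep (pairs : List (String × String)) :
    (pairs.foldl cijPStep PySem.Dict.empty).keys = PySem.List.dedup (pairs.map (·.1)) := by
  have h := PySem.Dict.keys_foldl_modify_key pairs (key := (·.1)) (d0 := ((0, 0) : Int × Int))
    (f := fun _ p => fun v => if p.2 = "sale" then (v.1 + 1, v.2) else (v.1, v.2 + 1))
    (d := PySem.Dict.empty)
  simpa [cijPStep, PySem.Dict.keys_empty, PySem.Set.update, PySem.List.dedup_eq_ofList,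
    PySem.Set.ofList_eq_foldl] using h

theorem nodup_keys_foldl_pstep (pairs : List (String × String)) :
    (pairs.foldl cijPStep PySem.Dict.empty).keys.Nodup := by
  exact PySem.Dict.nodup_keys_foldl_modify_key pairs (key := (·.1)) (d0 := ((0, 0) : Int × Int))
    (f := fun _ p => fun v => if p.2 = "sale" then (v.1 + 1, v.2) else (v.1, v.2 + 1))
    PySem.Dict.empty (by simp [PySem.Dict.keys_empty])

-- ===== VERDICT (by name: the statement is the Claim_ definition above) =====
theorem count_insider_transactions_from_json_spec : Claim_equal_count_insider_transactions_from_json := by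
  intro data _
  unfold Spec_count_insider_transactions_from_json
  unfold count_insider_transactions_from_json count_insider_transactions_from_json_alt
  dsimp only
  rw [pairs_foldl_eq, foldA_eq_foldP]
  rw [List.nil_append]
  rw [PySem.Dict.items_eq_map_keys _ (nodup_keys_foldl_pstep _) ((0, 0) : Int × Int)]
  rw [List.map_map, keys_foldl_pstep]
  apply List.map_congr_left
  intro t _
  simp [getD_foldl_pstep, PySem.Dict.getD_empty, PySem.Dict.getD_counter]
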